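-- pv_equiv track=rewrite | github.com/maxence-glt/UC-Berkeley-CS61a | HW 03.py | missing_digits
-- ===== SOURCE A (Python) =====
-- def missing_digits(n):
--     if n < 10:
--         return 0
--     if ((n % 100) // 10) == ((n % 10)):
--         return missing_digits(n // 10)
--     if ((n % 100) // 10) != ((n % 10) - 1):
--             return (((n % 10) - 1) - ((n % 100) // 10)) + missing_digits(n // 10)
--     else:
--         return 0
-- ===== SOURCE B (Python) =====
-- def missing_digits(n):
--     total = 0
--     while n >= 10:
--         d0 = n % 10
--         d1 = (n % 100) // 10
--         if d1 == d0 - 1: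
--             break
--         if d1 != d0:
--             total += (d0 - 1) - d1
--         n //= 10
--     return total
-- ===== Notes on version B (the rewrite author's own statement) =====
-- stated objective: alternative
-- what changed: Replaced the non-tail recursion (which adds each gap onto the recursive result) with an iterative while-loop carrying an accumulator, where A's early-return-0 on a consecutive pair becomes a break.
import Mathlib
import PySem

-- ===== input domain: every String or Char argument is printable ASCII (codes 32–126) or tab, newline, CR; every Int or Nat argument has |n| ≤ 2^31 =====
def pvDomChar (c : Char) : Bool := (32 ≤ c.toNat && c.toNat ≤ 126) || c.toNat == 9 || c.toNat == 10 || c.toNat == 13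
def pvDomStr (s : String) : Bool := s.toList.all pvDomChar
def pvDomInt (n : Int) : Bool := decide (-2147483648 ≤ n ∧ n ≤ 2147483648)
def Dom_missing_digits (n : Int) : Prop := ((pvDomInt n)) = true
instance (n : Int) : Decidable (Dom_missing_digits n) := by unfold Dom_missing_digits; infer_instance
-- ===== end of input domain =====

-- B replaces A's non-tail recursion with an iterative accumulator loop (same values, different decomposition).

-- termination helper for both ports
theorem pv_md_dec (n : Int) (h : ¬ n < 10) : (PySem.Int.floordiv n 10).toNat < n.toNat := by
  rw [PySem.Int.floordiv_eq_ediv_of_pos (by norm_num : (0:Int) < 10)]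
  omega

-- ===== PORT A =====
def missing_digits (n : Int) : Int :=
  if h : n < 10 then 0
  else if PySem.Int.floordiv (PySem.Int.mod n 100) 10 = PySem.Int.mod n 10 then
    missing_digits (PySem.Int.floordiv n 10)
  else if PySem.Int.floordiv (PySem.Int.mod n 100) 10 ≠ PySem.Int.mod n 10 - 1 then
    ((PySem.Int.mod n 10 - 1) - PySem.Int.floordiv (PySem.Int.mod n 100) 10)
      + missing_digits (PySem.Int.floordiv n 10)
  else 0
termination_by n.toNat
decreasing_by all_goals exact pv_md_dec n h

-- ===== PORT B =====
-- the while-loop of Source B, as a tail recursion over (n, total)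
def mdLoop (n total : Int) : Int :=
  if h : n ≥ 10 then
    let d0 := PySem.Int.mod n 10
    let d1 := PySem.Int.floordiv (PySem.Int.mod n 100) 10
    if d1 = d0 - 1 then total                 -- break
    else if d1 ≠ d0 then
      mdLoop (PySem.Int.floordiv n 10) (total + ((d0 - 1) - d1))
    else
      mdLoop (PySem.Int.floordiv n 10) total
  else total
termination_by n.toNat
decreasing_by all_goals exact pv_md_dec n (by omega)

def missing_digits_alt (n : Int) : Int := mdLoop n 0

-- ===== PRECONDITION & SPEC =====
def Spec_missing_digits (n : Int) (out : Int) : Prop := out = missing_digits_alt n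
instance (n : Int) (out : Int) : Decidable (Spec_missing_digits n out) := by unfold Spec_missing_digits; infer_instance

-- ===== CLAIM (what is proved, stated in full; the proofs are below) =====
def Claim_equal_missing_digits : Prop := ∀ (n : Int), Dom_missing_digits n → Spec_missing_digits n (missing_digits n)

-- ===== LEMMAS AND PROOFS =====
theorem mdLoop_eq (k : Nat) : ∀ (n total : Int), n.toNat ≤ k → mdLoop n total = total + missing_digits n := by
  induction k with
  | zero =>
    intro n total h
    have hn : n < 10 := by omega
    rw [mdLoop, missing_digits]
    simp [hn, show ¬ n ≥ 10 by omega]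
  | succ k ih =>
    intro n total h
    by_cases hn : n < 10
    · rw [mdLoop, missing_digits]
      simp [hn, show ¬ n ≥ 10 by omega]
    · have hrec : (PySem.Int.floordiv n 10).toNat ≤ k := by
        have := pv_md_dec n hn
        omega
      have IH : ∀ t : Int, mdLoop (PySem.Int.floordiv n 10) t
          = t + missing_digits (PySem.Int.floordiv n 10) := fun t => ih _ t hrec
      rw [mdLoop, missing_digits, dif_pos (show n ≥ 10 by omega), dif_neg hn]
      simp only [IH]
      split_ifs <;> omega

-- ===== VERDICT (by name: the statement is the Claim_ definition above) =====
theorem missing_digits_spec : Claim_equal_missing_digits := by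
  intro n _
  unfold Spec_missing_digits missing_digits_alt
  rw [mdLoop_eq n.toNat n 0 le_rfl]
  ring
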